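-- pv_equiv track=rewrite | github.com/MdAmzadAli/note-taking-app | backend_python/utils/chunkingUtils/text_processing.py | fix_character_spacing
-- ===== SOURCE A (Python) =====
-- def fix_character_spacing(text: str) -> str:
--     """Fix character spacing issues in text"""
--     if not text:
--         return text
--
--     # Check if line has excessive single character words
--     words = text.split()
--     if len(words) < 5:
--         return text
--
--     single_char_words = [w for w in words if len(w) == 1 and w.isalnum()]
--     single_char_ratio = len(single_char_words) / len(words)
--
--     if single_char_ratio > 0.4:  # More than 40% single characters
--         # Try to merge consecutive single characters
--         result_words = []
--         i = 0
--         while i < len(words):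
--             word = words[i]
--             if len(word) == 1 and word.isalnum():
--                 # Collect consecutive single characters
--                 char_sequence = [word]
--                 j = i + 1
--                 while (j < len(words) and
--                        len(words[j]) == 1 and
--                        words[j].isalnum()):
--                     char_sequence.append(words[j])
--                     j += 1
--
--                 # Merge if we have multiple consecutive single chars
--                 if len(char_sequence) > 1:
--                     merged_word = ''.join(char_sequence)
--                     result_words.append(merged_word)
--                     i = j
--                 else:
--                     result_words.append(word)
--                     i += 1
--             else:
--                 result_words.append(word)
--                 i += 1
--
--         return ' '.join(result_words)
--
--     return text
-- ===== SOURCE B (Python) =====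
-- def fix_character_spacing(text: str) -> str:
--     """Fix character spacing issues in text"""
--     if not text:
--         return text
--
--     words = text.split()
--     if len(words) < 5:
--         return text
--
--     single_char_words = [w for w in words if len(w) == 1 and w.isalnum()]
--     single_char_ratio = len(single_char_words) / len(words)
--
--     if single_char_ratio > 0.4:
--         # One pass with a pending-run buffer: singles accumulate in `pending`,
--         # which is flushed as one merged word at each non-single word / at the end.
--         result_words = []
--         pending = []
--         for w in words:
--             if len(w) == 1 and w.isalnum():
--                 pending.append(w)
--             else:
--                 if pending:
--                     result_words.append(''.join(pending))
--                     pending = []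
--                 result_words.append(w)
--         if pending:
--             result_words.append(''.join(pending))
--         return ' '.join(result_words)
--
--     return text
-- ===== Notes on version B (the rewrite author's own statement) =====
-- stated objective: simpler
-- what changed: A's index-driven while-loop with an inner scan that collects each run of single alnum chars and jumps i=j is replaced by a single for-pass that buffers the current run in `pending` and flushes it (joined) at each run boundary; the guards and ratio test are kept.
import Mathlib
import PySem

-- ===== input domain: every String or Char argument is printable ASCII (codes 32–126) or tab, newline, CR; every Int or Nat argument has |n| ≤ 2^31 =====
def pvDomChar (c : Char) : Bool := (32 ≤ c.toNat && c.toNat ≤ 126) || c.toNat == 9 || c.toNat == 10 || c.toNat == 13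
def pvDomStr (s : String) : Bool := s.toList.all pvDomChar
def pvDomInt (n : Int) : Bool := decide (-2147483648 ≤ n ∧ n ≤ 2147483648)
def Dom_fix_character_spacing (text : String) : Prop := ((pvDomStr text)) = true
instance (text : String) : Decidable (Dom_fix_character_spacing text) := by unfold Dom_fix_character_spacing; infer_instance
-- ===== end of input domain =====

-- B replaces A's index-jumping while-loop (inner scan collecting a run, then i = j)
-- by a single pass with a pending-run buffer flushed at run boundaries; objective: simpler.
-- The float test `ratio > 0.4` is ported as the exact rational test 5*singles > 2*words,
-- which agrees with the double computation for any realistic word count (< 2^50 words).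

-- `len(w) == 1 and w.isalnum()` — the identical test both Pythons write
def fcsIsSingle (w : List Char) : Bool := w.length == 1 && PySem.Chars.strIsalnum w

-- ===== PORT A =====
-- inner while: collect the leading consecutive single alnum chars, return (collected, rest)
def fcsInnerA (ws : List (List Char)) : List (List Char) × List (List Char) :=
  match ws with
  | [] => ([], [])
  | w :: rest =>
    if fcsIsSingle w then
      let p := fcsInnerA rest
      (w :: p.1, p.2)
    else ([], w :: rest)

theorem fcsInnerA_snd_length (ws : List (List Char)) : (fcsInnerA ws).2.length ≤ ws.length := by
  induction ws with
  | nil => simp [fcsInnerA]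
  | cons w rest ih =>
    simp only [fcsInnerA]
    split
    · simpa using Nat.le_succ_of_le ih
    · simp

-- outer while over the suffix of `words` starting at index i, accumulator = result_words
def fcsLoopA (ws : List (List Char)) (acc : List (List Char)) : List (List Char) :=
  match ws with
  | [] => acc
  | w :: rest =>
    if fcsIsSingle w then
      let p := fcsInnerA rest
      if 1 < (w :: p.1).length then
        fcsLoopA p.2 (acc ++ [PySem.Chars.join [] (w :: p.1)])
      else
        fcsLoopA rest (acc ++ [w])
    else fcsLoopA rest (acc ++ [w])
termination_by ws.length
decreasing_by
  · exact Nat.lt_succ_of_le (fcsInnerA_snd_length rest)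
  · simp
  · simp

def fix_character_spacing (text : String) : String :=
  if text.toList.isEmpty then text
  else
    let words := PySem.Chars.split₀ text.toList
    if words.length < 5 then text
    else
      let single_char_words := words.filter fcsIsSingle
      if 2 * words.length < 5 * single_char_words.length then
        String.ofList (PySem.Chars.join [' '] (fcsLoopA words []))
      else text

-- ===== PORT B =====
-- flush: `if pending: result_words.append(''.join(pending))`
def fcsFlushB (acc pending : List (List Char)) : List (List Char) :=
  if pending.isEmpty then acc else acc ++ [PySem.Chars.join [] pending]

-- the single `for w in words` pass with the pending-run buffer
def fcsLoopB (ws : List (List Char)) (acc pending : List (List Char)) : List (List Char) :=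
  match ws with
  | [] => fcsFlushB acc pending
  | w :: rest =>
    if fcsIsSingle w then fcsLoopB rest acc (pending ++ [w])
    else fcsLoopB rest (fcsFlushB acc pending ++ [w]) []

def fix_character_spacing_alt (text : String) : String :=
  if text.toList.isEmpty then text
  else
    let words := PySem.Chars.split₀ text.toList
    if words.length < 5 then text
    else
      let singles := words.countP fcsIsSingle
      if 2 * words.length < 5 * singles then
        String.ofList (PySem.Chars.join [' '] (fcsLoopB words [] []))
      else text

-- ===== PRECONDITION & SPEC =====
def Spec_fix_character_spacing (text : String) (out : String) : Prop := out = fix_character_spacing_alt text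
instance (text : String) (out : String) : Decidable (Spec_fix_character_spacing text out) := by unfold Spec_fix_character_spacing; infer_instance

-- ===== CLAIM (what is proved, stated in full; the proofs are below) =====
def Claim_equal_fix_character_spacing : Prop := ∀ (text : String), Dom_fix_character_spacing text → Spec_fix_character_spacing text (fix_character_spacing text)

-- ===== LEMMAS AND PROOFS =====

-- A's inner while is exactly takeWhile/dropWhile on the suffix
theorem fcsInnerA_eq (ws : List (List Char)) :
    fcsInnerA ws = (ws.takeWhile fcsIsSingle, ws.dropWhile fcsIsSingle) := by
  induction ws with
  | nil => simp [fcsInnerA]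
  | cons w rest ih =>
    simp only [fcsInnerA, List.takeWhile, List.dropWhile]
    by_cases h : fcsIsSingle w <;> simp [h, ih]

-- B consumes a run of singles by accumulating it onto `pending`
theorem fcsLoopB_run (ws : List (List Char)) : ∀ (acc pending : List (List Char)),
    fcsLoopB ws acc pending =
      fcsLoopB (ws.dropWhile fcsIsSingle) acc (pending ++ ws.takeWhile fcsIsSingle) := by
  induction ws with
  | nil => simp
  | cons w rest ih =>
    intro acc pending
    by_cases h : fcsIsSingle w
    · simp only [fcsLoopB, List.takeWhile, List.dropWhile, h]
      rw [ih]
      simp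
    · simp [h]

-- the two merging loops agree
theorem fcsLoop_eq (ws : List (List Char)) (acc : List (List Char)) :
    fcsLoopA ws acc = fcsLoopB ws acc [] := by
  match ws with
  | [] => simp [fcsLoopA, fcsLoopB, fcsFlushB]
  | w :: rest =>
    by_cases h : fcsIsSingle w
    · rw [fcsLoopA, if_pos h, fcsInnerA_eq]
      rw [show fcsLoopB (w :: rest) acc [] = fcsLoopB rest acc [w] by simp [fcsLoopB, h]]
      rw [fcsLoopB_run rest]
      cases hseq : rest.takeWhile fcsIsSingle with
      | nil =>
        -- lone single char: A appends w and moves on by one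
        have hdrop : rest.dropWhile fcsIsSingle = rest := by
          cases rest with
          | nil => simp
          | cons x xs =>
            have hx : ¬ fcsIsSingle x := by
              intro hx; simp [hx] at hseq
            simp [hx]
        simp only [hdrop, List.length_cons, List.length_nil]
        rw [if_neg (by omega)]
        rw [fcsLoop_eq rest (acc ++ [w])]
        cases rest with
        | nil => simp [fcsLoopB, fcsFlushB, PySem.Chars.join_singleton]
        | cons x xs =>
          have hx : ¬ fcsIsSingle x := by
            intro hx; simp [hx] at hseq
          simp [fcsLoopB, hx, fcsFlushB, PySem.Chars.join_singleton]
      | cons s seqt =>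
        -- a genuine run: A merges w :: seq and jumps to the rest of the run
        rw [if_pos (by simp)]
        have hws : [w] ++ (s :: seqt) = w :: s :: seqt := by simp
        cases hdrop : rest.dropWhile fcsIsSingle with
        | nil =>
          rw [fcsLoopA]
          simp [fcsLoopB, fcsFlushB, hws]
        | cons x xs =>
          have hx : ¬ fcsIsSingle x := by
            have h2 : rest.dropWhile fcsIsSingle ≠ [] := by simp [hdrop]
            have := List.head_dropWhile_not (l := rest) (p := fcsIsSingle) h2
            simpa [hdrop] using this
          have hlen : xs.length < (w :: rest).length := by
            have : (x :: xs).length ≤ rest.length := by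
              rw [← hdrop]; exact List.length_dropWhile_le _ _
            simp at this; simp; omega
          rw [fcsLoopA, if_neg hx]
          rw [fcsLoop_eq xs (acc ++ [PySem.Chars.join [] (w :: s :: seqt)] ++ [x])]
          simp [fcsLoopB, hx, fcsFlushB, hws]
    · rw [fcsLoopA, if_neg h]
      rw [fcsLoop_eq rest (acc ++ [w])]
      simp [fcsLoopB, h, fcsFlushB]
termination_by ws.length
decreasing_by
  · simp
  · exact hlen
  · simp

-- ===== VERDICT (by name: the statement is the Claim_ definition above) =====
theorem fix_character_spacing_spec : Claim_equal_fix_character_spacing := by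
  intro text _
  unfold Spec_fix_character_spacing fix_character_spacing fix_character_spacing_alt
  split
  · rfl
  · simp only [List.countP_eq_length_filter]
    split
    · rfl
    · split
      · rw [fcsLoop_eq]
      · rfl
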